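-- pv_equiv track=rewrite | github.com/kirillvititnev/mooreDiagrams | main.py | create_states_for_linear_function
-- ===== SOURCE A (Python) =====
-- a = 4
--
-- b = 0
--
-- def fx(x):
--     return (a*x+b)
--
-- def calculate_value(n,k,z,p):
--     return ((fx(n+z*p**k)-(fx(n)%(p**k)))//p**k)%p
--
-- def calculate_start_state(z,p):
--     return fx(z)%p
--
-- def create_states_for_linear_function(a,b,p):
--     states = dict()
--     states[f"0,0"] = {f"{sym}" : (f"{calculate_start_state(sym,p)}", f"{sym},1") for sym in range(p)}
--     ending_states = set()
--     for k in range (1,7):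
--
--         ending_states.clear()
--         processing_states = []
--         for key,state in states.items():
--                 pos=key.find(",")
--                 prev_num = int(key[:pos])
--                 prev_k = int(key[pos+1:])
--                 if k == prev_k+1:
--                     processing_states.append(key)
--         for state_name in processing_states:
--             pos = state_name.find(",")
--             prev_num = int(state_name[:pos])
--             prev_k = int(state_name[pos+1:])
--             for sym in range(p):
--                 processed_number = (p**(k-1)*sym+prev_num)
--
--                 equiv_state = []
--                 for state, value in states.items():
--                     f = 1
--                     for check_sym in range(p):
--                         new_value = calculate_value(processed_number,k,check_sym,p)
--                         if value[f"{check_sym}"][0] != f"{new_value}":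
--                             f = 0
--                     if f:
--                         equiv_state.append(f"{processed_number},{k}")
--                         equiv_state.append(value)
--                 # if equiv_state!= []:
--                 #     states[f"{processed_number},{k}"] = equiv_state[1]
--                 # else:
--                 states[f"{processed_number},{k}"] = {f"{new_sym}" : (f"{calculate_value(processed_number,k,new_sym,p)}", f"{processed_number+p**k*new_sym},{k+1}") for new_sym in range(p)}
--     return states
-- ===== SOURCE B (Python) =====
-- # Re-implementation: keeps a numeric frontier of the states created at the previous level
-- # instead of re-scanning and re-parsing the whole dict's keys each round, and drops A's
-- # dead equivalent-state scan. The module constants a=4, b=0 are hard-coded in fx, so the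
-- # parameters a and b are unused (exactly as in A, whose parameters shadow the globals).
--
-- def create_states_for_linear_function(a, b, p):
--     def value(n, k, z):
--         pk = p ** k
--         return ((4 * (n + z * pk) - (4 * n) % pk) // pk) % p
--
--     states = {"0,0": {str(s): (str(4 * s % p), f"{s},1") for s in range(p)}}
--     frontier = [0]
--     for k in range(1, 7):
--         frontier = [s * p ** (k - 1) + n for n in frontier for s in range(p)]
--         pk = p ** k
--         for n in frontier:
--             states[f"{n},{k}"] = {str(s): (str(value(n, k, s)), f"{n + pk * s},{k + 1}") for s in range(p)}
--     return states
-- ===== Notes on version B (the rewrite author's own statement) =====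
-- stated objective: faster
-- what changed: B carries the previous level's state numbers as a list (the frontier) and extends it arithmetically, instead of A's per-level rescan of all dict keys with string parsing to rebuild the frontier, and it drops A's dead equivalent-state scan that compares every new state against every stored state.
import Mathlib
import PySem

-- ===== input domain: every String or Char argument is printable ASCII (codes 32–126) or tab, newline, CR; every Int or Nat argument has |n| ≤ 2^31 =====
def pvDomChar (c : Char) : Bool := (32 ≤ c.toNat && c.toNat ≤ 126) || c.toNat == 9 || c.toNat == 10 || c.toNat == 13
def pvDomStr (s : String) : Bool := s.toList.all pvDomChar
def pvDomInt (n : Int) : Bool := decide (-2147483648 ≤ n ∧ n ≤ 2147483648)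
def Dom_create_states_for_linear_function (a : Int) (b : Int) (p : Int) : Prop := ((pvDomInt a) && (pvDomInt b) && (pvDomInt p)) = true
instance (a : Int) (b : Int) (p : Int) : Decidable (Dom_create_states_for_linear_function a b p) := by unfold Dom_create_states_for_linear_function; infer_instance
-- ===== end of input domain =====

-- B keeps the previous level's state numbers as a list (a numeric frontier) instead of A's
-- per-level rescan of every dict key with string parsing, and drops A's dead equivalent-state
-- scan (A rebuilds and discards it for every new state). Objective: faster.

-- ===== PORT A =====
-- module-level constants a = 4, b = 0: fx reads these globals; the function's own a, b
-- parameters shadow them in Python but are never used by the body, exactly as ported here.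
def pvGlobalA : Int := 4
def pvGlobalB : Int := 0

def fx (x : Int) : Int := pvGlobalA * x + pvGlobalB

def calculate_value (n k z p : Int) : Int :=
  PySem.Int.mod (PySem.Int.floordiv (fx (n + z * p ^ k.toNat) - PySem.Int.mod (fx n) (p ^ k.toNat)) (p ^ k.toNat)) p

def calculate_start_state (z p : Int) : Int := PySem.Int.mod (fx z) p

-- int(s) ported by hand below (pyInt?): an exact clone of CPython's int() on the ASCII domain
-- (strip int-whitespace, optional sign, decimal digits with single underscores between digits).
-- PySem.Int.ofStr? models the same built-in, but its digit loop is a private definition about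
-- which no lemma is exported, so the roundtrip int(str(n)) = n that the equivalence proof needs
-- cannot be stated about it; pyInt? is transcribed from that same definition, step for step.
def pyIntSpace (c : Char) : Bool :=
  c = ' ' || c = '\t' || c = '\n' || c = '\r' || c = '\x0b' || c = '\x0c'

def pyDigitsVal? : List Char → Bool → Nat → Option Nat
  | [], afterDigit, acc => if afterDigit then some acc else none
  | c :: rest, afterDigit, acc =>
    if c.isDigit then pyDigitsVal? rest true (acc * 10 + (c.toNat - '0'.toNat))
    else if c = '_' ∧ afterDigit then
      match rest with
      | d :: _ => if d.isDigit then pyDigitsVal? rest false acc else none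
      | [] => none
    else none

def pyIntChars? (s : List Char) : Option Int :=
  let cs := ((s.dropWhile pyIntSpace).reverse.dropWhile pyIntSpace).reverse
  match cs with
  | [] => none
  | c :: ds =>
    if c = '-' then (pyDigitsVal? ds false 0).map (fun n => -(n : Int))
    else if c = '+' then (pyDigitsVal? ds false 0).map (fun n => (n : Int))
    else (pyDigitsVal? (c :: ds) false 0).map (fun n => (n : Int))

def pyInt? (s : String) : Option Int := pyIntChars? s.toList

-- states["0,0"] = {f"{sym}": (f"{calculate_start_state(sym,p)}", f"{sym},1") for sym in range(p)}
def pvA_startDict (p : Int) : PySem.Dict String (String × String) :=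
  (PySem.List.pyRange 0 p 1).foldl
    (fun d sym => d.insert (PySem.Int.toStr sym)
      (PySem.Int.toStr (calculate_start_state sym p), PySem.Int.toStr sym ++ ",1"))
    PySem.Dict.empty

-- one pass of the first inner loop: parse a key "n,k" and keep it if k == prev_k + 1
def pvA_filterStep (k : Int) (acc : List String) (kv : String × PySem.Dict String (String × String)) :
    List String :=
  let key := kv.1
  let pos := PySem.Str.find key ","
  let _prev_num := (pyInt? (PySem.Str.slice key none (some pos))).getD 0
  let prev_k := (pyInt? (PySem.Str.slice key (some (pos + 1)) none)).getD 0
  if k = prev_k + 1 then acc ++ [key] else acc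

-- {f"{new_sym}": (f"{calculate_value(...)}", f"{...},{k+1}") for new_sym in range(p)}
def pvA_innerDict (p pn k : Int) : PySem.Dict String (String × String) :=
  (PySem.List.pyRange 0 p 1).foldl
    (fun d new_sym => d.insert (PySem.Int.toStr new_sym)
      (PySem.Int.toStr (calculate_value pn k new_sym p),
       PySem.Int.toStr (pn + p ^ k.toNat * new_sym) ++ "," ++ PySem.Int.toStr (k + 1)))
    PySem.Dict.empty

-- the equiv_state scan (its value is dead in the Python too: it is built and never read)
def pvA_equivState (p pn k : Int) (states : PySem.Dict String (PySem.Dict String (String × String))) :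
    List (Sum String (PySem.Dict String (String × String))) :=
  states.items.foldl (fun eq kv =>
    let value := kv.2
    let f : Int := (PySem.List.pyRange 0 p 1).foldl (fun f check_sym =>
      let new_value := calculate_value pn k check_sym p
      if ((value.get? (PySem.Int.toStr check_sym)).getD ("", "")).1 ≠ PySem.Int.toStr new_value
      then 0 else f) 1
    if f ≠ 0 then
      eq ++ [Sum.inl (PySem.Int.toStr pn ++ "," ++ PySem.Int.toStr k), Sum.inr value]
    else eq) []

def pvA_symStep (p k prev_num : Int)
    (states : PySem.Dict String (PySem.Dict String (String × String))) (sym : Int) :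
    PySem.Dict String (PySem.Dict String (String × String)) :=
  let processed_number := p ^ (k - 1).toNat * sym + prev_num
  let _equiv_state := pvA_equivState p processed_number k states
  states.insert (PySem.Int.toStr processed_number ++ "," ++ PySem.Int.toStr k)
    (pvA_innerDict p processed_number k)

def pvA_stateStep (p k : Int)
    (states : PySem.Dict String (PySem.Dict String (String × String))) (state_name : String) :
    PySem.Dict String (PySem.Dict String (String × String)) :=
  let pos := PySem.Str.find state_name ","
  let prev_num := (pyInt? (PySem.Str.slice state_name none (some pos))).getD 0
  let _prev_k := (pyInt? (PySem.Str.slice state_name (some (pos + 1)) none)).getD 0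
  (PySem.List.pyRange 0 p 1).foldl (pvA_symStep p k prev_num) states

def pvA_kStep (p : Int) (states : PySem.Dict String (PySem.Dict String (String × String)))
    (k : Int) : PySem.Dict String (PySem.Dict String (String × String)) :=
  -- ending_states.clear() touches only the dead set; processing_states rebuilt by parsing keys
  let processing_states := states.items.foldl (pvA_filterStep k) []
  processing_states.foldl (pvA_stateStep p k) states

def create_states_for_linear_function (a : Int) (b : Int) (p : Int) :
    List (String × List (String × String × String)) :=
  let states := PySem.Dict.empty.insert "0,0" (pvA_startDict p)
  let _ending_states : PySem.Set String := PySem.Set.empty   -- built, cleared, never read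
  let states := (PySem.List.pyRange 1 7 1).foldl (pvA_kStep p) states
  states.items.map (fun kv => (kv.1, kv.2.items))

-- ===== PORT B =====
-- value(n, k, z) (closure over p; module constants a=4, b=0 hard-coded as in Source B)
def pvB_value (p n k z : Int) : Int :=
  let pk := p ^ k.toNat
  PySem.Int.mod (PySem.Int.floordiv (4 * (n + z * pk) - PySem.Int.mod (4 * n) pk) pk) p

def pvB_startDict (p : Int) : PySem.Dict String (String × String) :=
  (PySem.List.pyRange 0 p 1).foldl
    (fun d s => d.insert (PySem.Int.toStr s)
      (PySem.Int.toStr (PySem.Int.mod (4 * s) p), PySem.Int.toStr s ++ ",1"))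
    PySem.Dict.empty

def pvB_innerDict (p n k : Int) : PySem.Dict String (String × String) :=
  let pk := p ^ k.toNat
  (PySem.List.pyRange 0 p 1).foldl
    (fun d s => d.insert (PySem.Int.toStr s)
      (PySem.Int.toStr (pvB_value p n k s),
       PySem.Int.toStr (n + pk * s) ++ "," ++ PySem.Int.toStr (k + 1)))
    PySem.Dict.empty

def pvB_kStep (p : Int)
    (acc : PySem.Dict String (PySem.Dict String (String × String)) × List Int) (k : Int) :
    PySem.Dict String (PySem.Dict String (String × String)) × List Int :=
  let frontier := acc.2.flatMap (fun n =>
    (PySem.List.pyRange 0 p 1).map (fun s => s * p ^ (k - 1).toNat + n))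
  let states := frontier.foldl (fun states n =>
    states.insert (PySem.Int.toStr n ++ "," ++ PySem.Int.toStr k) (pvB_innerDict p n k)) acc.1
  (states, frontier)

def create_states_for_linear_function_alt (a : Int) (b : Int) (p : Int) :
    List (String × List (String × String × String)) :=
  let states := PySem.Dict.empty.insert "0,0" (pvB_startDict p)
  let res := (PySem.List.pyRange 1 7 1).foldl (pvB_kStep p) (states, [0])
  res.1.items.map (fun kv => (kv.1, kv.2.items))

-- ===== PRECONDITION & SPEC =====
def Spec_create_states_for_linear_function (a : Int) (b : Int) (p : Int) (out : List (String × List (String × String × String))) : Prop := out = create_states_for_linear_function_alt a b p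
instance (a : Int) (b : Int) (p : Int) (out : List (String × List (String × String × String))) : Decidable (Spec_create_states_for_linear_function a b p out) := by unfold Spec_create_states_for_linear_function; infer_instance

-- ===== CLAIM (what is proved, stated in full; the proofs are below) =====
def Claim_equal_create_states_for_linear_function : Prop := ∀ (a : Int) (b : Int) (p : Int), Dom_create_states_for_linear_function a b p → Spec_create_states_for_linear_function a b p (create_states_for_linear_function a b p)

-- ===== LEMMAS AND PROOFS =====

/- ## 1. Decimal digits: `Nat.toDigits` structure and the int(str(n)) = n roundtrip -/

def pvDigs (n : Nat) (tl : List Char) : List Char :=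
  if n / 10 = 0 then (n % 10).digitChar :: tl
  else pvDigs (n / 10) ((n % 10).digitChar :: tl)
termination_by n
decreasing_by omega

def pvTen (n : Nat) : Nat :=
  if n / 10 = 0 then 10 else 10 * pvTen (n / 10)
termination_by n
decreasing_by omega

theorem pv_toDigitsCore_eq : ∀ (f n : Nat), n < f → ∀ tl, Nat.toDigitsCore 10 f n tl = pvDigs n tl := by
  intro f
  induction f with
  | zero => intro n h; omega
  | succ f ih =>
    intro n h tl
    rw [pvDigs]
    simp only [Nat.toDigitsCore]
    by_cases h10 : n / 10 = 0
    · simp [h10]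
    · simp only [h10, if_false]
      exact ih (n / 10) (by omega) _

theorem pv_toDigits_eq (n : Nat) : Nat.toDigits 10 n = pvDigs n [] :=
  pv_toDigitsCore_eq (n + 1) n (Nat.lt_succ_self n) []

theorem pv_digitChar_isDigit (d : Nat) (h : d < 10) : (Nat.digitChar d).isDigit = true := by
  interval_cases d <;> decide

theorem pv_digitChar_val (d : Nat) (h : d < 10) : (Nat.digitChar d).toNat - '0'.toNat = d := by
  interval_cases d <;> decide

theorem pv_isDigit_ne {c : Char} (h : c.isDigit = true) (d : Char) (hd : d.isDigit = false) :
    c ≠ d := by rintro rfl; rw [h] at hd; cases hd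

theorem pv_mem_pvDigs (n : Nat) (tl : List Char) :
    ∀ c ∈ pvDigs n tl, c ∈ tl ∨ c.isDigit = true := by
  induction n, tl using pvDigs.induct with
  | case1 n tl h =>
    intro c hc
    rw [pvDigs, if_pos h] at hc
    rcases List.mem_cons.1 hc with rfl | hc
    · exact Or.inr (pv_digitChar_isDigit _ (by omega))
    · exact Or.inl hc
  | case2 n tl h ih =>
    intro c hc
    rw [pvDigs, if_neg h] at hc
    rcases ih c hc with h' | h'
    · rcases List.mem_cons.1 h' with rfl | h''
      · exact Or.inr (pv_digitChar_isDigit _ (by omega))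
      · exact Or.inl h''
    · exact Or.inr h' 

theorem pv_digits_toDigits (n : Nat) : ∀ c ∈ Nat.toDigits 10 n, c.isDigit = true := by
  rw [pv_toDigits_eq]
  intro c hc
  rcases pv_mem_pvDigs n [] c hc with h | h
  · cases h
  · exact h

theorem pv_pyDigitsVal_pvDigs (n : Nat) (tl : List Char) :
    ∀ (b0 : Bool) (acc : Nat),
      pyDigitsVal? (pvDigs n tl) b0 acc = pyDigitsVal? tl true (acc * pvTen n + n) := by
  induction n, tl using pvDigs.induct with
  | case1 n tl h =>
    intro b0 acc
    rw [pvDigs, if_pos h, pvTen, if_pos h]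
    have hd : (Nat.digitChar (n % 10)).isDigit = true := pv_digitChar_isDigit _ (by omega)
    simp only [pyDigitsVal?, hd, if_true]
    rw [pv_digitChar_val _ (by omega)]
    congr 1
    omega
  | case2 n tl h ih =>
    intro b0 acc
    rw [pvDigs, if_neg h, pvTen, if_neg h, ih]
    have hd : (Nat.digitChar (n % 10)).isDigit = true := pv_digitChar_isDigit _ (by omega)
    simp only [pyDigitsVal?, hd, if_true]
    rw [pv_digitChar_val _ (by omega)]
    congr 1
    have h2 : n % 10 + n / 10 * 10 = n := by omega
    ring_nf
    omega

theorem pv_dropWhile_space_digits (l : List Char) (h : ∀ c ∈ l, c.isDigit = true) :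
    l.dropWhile pyIntSpace = l := by
  cases l with
  | nil => rfl
  | cons c t =>
    have hc : c.isDigit = true := h c (by simp)
    have h1 : c ≠ ' ' := pv_isDigit_ne hc _ (by decide)
    have h2 : c ≠ '\t' := pv_isDigit_ne hc _ (by decide)
    have h3 : c ≠ '\n' := pv_isDigit_ne hc _ (by decide)
    have h4 : c ≠ '\r' := pv_isDigit_ne hc _ (by decide)
    have h5 : c ≠ '\x0b' := pv_isDigit_ne hc _ (by decide)
    have h6 : c ≠ '\x0c' := pv_isDigit_ne hc _ (by decide)
    simp [pyIntSpace, h1, h2, h3, h4, h5, h6]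

theorem pv_pyIntChars_digits (l : List Char) (hne : l ≠ []) (h : ∀ c ∈ l, c.isDigit = true) :
    pyIntChars? l = (pyDigitsVal? l false 0).map (fun n => (n : Int)) := by
  have h1 : l.dropWhile pyIntSpace = l := pv_dropWhile_space_digits l h
  have h2 : l.reverse.dropWhile pyIntSpace = l.reverse :=
    pv_dropWhile_space_digits _ (fun c hc => h c (List.mem_reverse.1 hc))
  rw [pyIntChars?]
  simp only [h1, h2, List.reverse_reverse]
  cases l with
  | nil => cases hne rfl
  | cons c ds =>
    have hc : c.isDigit = true := h c (by simp)
    simp only [if_neg (pv_isDigit_ne hc '-' (by decide)), if_neg (pv_isDigit_ne hc '+' (by decide))]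

theorem pv_pvDigs_ne_nil (n : Nat) (tl : List Char) : pvDigs n tl ≠ [] := by
  induction n, tl using pvDigs.induct with
  | case1 n tl h => rw [pvDigs, if_pos h]; simp
  | case2 n tl h ih => rw [pvDigs, if_neg h]; exact ih

theorem pv_roundtrip_nat (m : Nat) : pyIntChars? (Nat.toDigits 10 m) = some (m : Int) := by
  rw [pv_toDigits_eq]
  rw [pv_pyIntChars_digits _ (pv_pvDigs_ne_nil _ _)
    (fun c hc => (pv_mem_pvDigs m [] c hc).resolve_left (by simp))]
  rw [pv_pyDigitsVal_pvDigs]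
  simp [pyDigitsVal?]

theorem pv_toChars_nonneg {n : Int} (h : 0 ≤ n) :
    PySem.Int.toChars n = Nat.toDigits 10 n.toNat := by
  rw [PySem.Int.toChars, if_neg (by omega)]

theorem pv_digits_toChars {n : Int} (h : 0 ≤ n) :
    ∀ c ∈ PySem.Int.toChars n, c.isDigit = true := by
  rw [pv_toChars_nonneg h]
  exact pv_digits_toDigits _

theorem pv_comma_not_mem_toChars {n : Int} (h : 0 ≤ n) : ',' ∉ PySem.Int.toChars n := by
  intro hc
  exact absurd (pv_digits_toChars h ',' hc) (by decide)

theorem pv_roundtrip {n : Int} (h : 0 ≤ n) : pyIntChars? (PySem.Int.toChars n) = some n := by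
  rw [pv_toChars_nonneg h, pv_roundtrip_nat]
  congr 1
  omega

theorem pv_toChars_inj {n m : Int} (hn : 0 ≤ n) (hm : 0 ≤ m)
    (h : PySem.Int.toChars n = PySem.Int.toChars m) : n = m := by
  have h1 := pv_roundtrip hn
  have h2 := pv_roundtrip hm
  rw [h, h2] at h1
  exact (Option.some_inj.1 h1).symm

/- ## 2. Keys "n,k": building, splitting, parsing -/

def mkKey (n k : Int) : String := PySem.Int.toStr n ++ "," ++ PySem.Int.toStr k

theorem pv_mkKey_def (n k : Int) :
    PySem.Int.toStr n ++ "," ++ PySem.Int.toStr k = mkKey n k := rfl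

theorem pv_key00 : ("0,0" : String) = mkKey 0 0 := by decide

theorem pv_toList_mkKey (n k : Int) :
    (mkKey n k).toList = PySem.Int.toChars n ++ ',' :: PySem.Int.toChars k := by
  show (PySem.Int.toStr n ++ "," ++ PySem.Int.toStr k).toList = _
  rw [String.toList_append, String.toList_append, PySem.Int.toList_toStr, PySem.Int.toList_toStr]
  simp

theorem pv_append_comma_inj : ∀ (xs xs' ys ys' : List Char), ',' ∉ xs → ',' ∉ xs' →
    xs ++ ',' :: ys = xs' ++ ',' :: ys' → xs = xs' ∧ ys = ys' := by
  intro xs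
  induction xs with
  | nil =>
    intro xs' ys ys' _ h2 heq
    cases xs' with
    | nil => simpa using heq
    | cons c t =>
      simp only [List.nil_append, List.cons_append, List.cons.injEq] at heq
      exact absurd (heq.1 ▸ List.mem_cons_self ..) h2
  | cons c t ih =>
    intro xs' ys ys' h1 h2 heq
    cases xs' with
    | nil =>
      simp only [List.nil_append, List.cons_append, List.cons.injEq] at heq
      exact absurd (heq.1.symm ▸ List.mem_cons_self ..) h1
    | cons c' t' =>
      simp only [List.cons_append, List.cons.injEq] at heq
      obtain ⟨rfl, heq⟩ := heq
      have := ih t' ys ys' (fun hx => h1 (List.mem_cons_of_mem _ hx))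
        (fun hx => h2 (List.mem_cons_of_mem _ hx)) heq
      exact ⟨by rw [this.1], this.2⟩

theorem pv_mkKey_inj {n k m j : Int} (hn : 0 ≤ n) (hk : 0 ≤ k) (hm : 0 ≤ m) (hj : 0 ≤ j)
    (h : mkKey n k = mkKey m j) : n = m ∧ k = j := by
  have hl := congrArg String.toList h
  rw [pv_toList_mkKey, pv_toList_mkKey] at hl
  have := pv_append_comma_inj _ _ _ _ (pv_comma_not_mem_toChars hn) (pv_comma_not_mem_toChars hm) hl
  exact ⟨pv_toChars_inj hn hm this.1, pv_toChars_inj hk hj this.2⟩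

theorem pv_find_comma (xs ys : List Char) (h : ',' ∉ xs) :
    PySem.Chars.find (xs ++ ',' :: ys) [','] = (xs.length : Int) := by
  have hinf : [','] <:+: xs ++ ',' :: ys := ⟨xs, ys, by simp⟩
  have h0 : 0 ≤ PySem.Chars.find (xs ++ ',' :: ys) [','] :=
    (PySem.Chars.find_nonneg_iff _ _).2 hinf
  obtain ⟨hpre, hmin⟩ := PySem.Chars.find_spec h0
  set q := (PySem.Chars.find (xs ++ ',' :: ys) [',']).toNat with hq
  have hqe : q = xs.length := by
    rcases lt_trichotomy q xs.length with hlt | heq | hgt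
    · exfalso
      obtain ⟨t, ht⟩ := hpre
      rw [List.drop_append_of_le_length (by omega)] at ht
      cases hd : xs.drop q with
      | nil => have := congrArg List.length hd; simp at this; omega
      | cons a u =>
        rw [hd] at ht
        simp only [List.cons_append, List.cons.injEq] at ht
        have ha : a ∈ xs := List.mem_of_mem_drop (hd ▸ List.mem_cons_self ..)
        rw [← ht.1] at ha
        exact h ha
    · exact heq
    · exact absurd ⟨ys, by simp⟩ (hmin xs.length hgt)
  omega

def parseNum (key : String) : Int :=
  (pyInt? (PySem.Str.slice key none (some (PySem.Str.find key ",")))).getD 0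

def parseLevel (key : String) : Int :=
  (pyInt? (PySem.Str.slice key (some (PySem.Str.find key "," + 1)) none)).getD 0

theorem pv_parseNum (n k : Int) (hn : 0 ≤ n) (_hk : 0 ≤ k) : parseNum (mkKey n k) = n := by
  have hfind : PySem.Str.find (mkKey n k) "," = ((PySem.Int.toChars n).length : Int) := by
    have hcomma : (("," : String)).toList = [','] := by decide
    simp only [PySem.Str.find_eq, hcomma, pv_toList_mkKey]
    exact pv_find_comma _ _ (pv_comma_not_mem_toChars hn)
  rw [parseNum, pyInt?, hfind]
  have hsl : (PySem.Str.slice (mkKey n k) none (some ((PySem.Int.toChars n).length : Int))).toList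
      = PySem.Int.toChars n := by
    simp only [PySem.Str.toList_slice, PySem.Chars.slice_eq_listSlice, pv_toList_mkKey]
    rw [PySem.List.slice_to_natCast]
    exact List.take_left ..
  rw [hsl, pv_roundtrip hn]
  rfl

theorem pv_parseLevel (n k : Int) (hn : 0 ≤ n) (hk : 0 ≤ k) : parseLevel (mkKey n k) = k := by
  have hfind : PySem.Str.find (mkKey n k) "," = ((PySem.Int.toChars n).length : Int) := by
    have hcomma : (("," : String)).toList = [','] := by decide
    simp only [PySem.Str.find_eq, hcomma, pv_toList_mkKey]
    exact pv_find_comma _ _ (pv_comma_not_mem_toChars hn)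
  rw [parseLevel, pyInt?, hfind]
  have hsl : (PySem.Str.slice (mkKey n k) (some (((PySem.Int.toChars n).length : Int) + 1)) none).toList
      = PySem.Int.toChars k := by
    simp only [PySem.Str.toList_slice, PySem.Chars.slice_eq_listSlice, pv_toList_mkKey]
    rw [PySem.List.slice_from _ (by omega)]
    have h1 : PySem.Int.toChars n ++ ',' :: PySem.Int.toChars k
        = (PySem.Int.toChars n ++ [',']) ++ PySem.Int.toChars k := by simp
    have h2 : (((PySem.Int.toChars n).length : Int) + 1).toNat
        = (PySem.Int.toChars n ++ [',']).length := by simp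
    rw [h1, h2]
    exact List.drop_left ..
  rw [hsl, pv_roundtrip hk]
  rfl

/- ## 3. The level structure both programs build -/

def pvOrd (p : Int) : Nat → List Int
  | 0 => [0]
  | k + 1 => (pvOrd p k).flatMap (fun n => (PySem.List.pyRange 0 p 1).map (fun s => s * p ^ k + n))

def pvLevel (p : Int) (k : Nat) : List (String × PySem.Dict String (String × String)) :=
  (pvOrd p k).map (fun n => (mkKey n (k : Int), pvB_innerDict p n (k : Int)))

def pvBlocks (p : Int) : Nat → List (String × PySem.Dict String (String × String))
  | 0 => [(mkKey 0 0, pvB_startDict p)]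
  | k + 1 => pvBlocks p k ++ pvLevel p (k + 1)

theorem pv_div_unique {q s s' n n' : Int} (hq : 0 < q) (h1 : 0 ≤ n) (h2 : n < q)
    (h3 : 0 ≤ n') (h4 : n' < q) (h : s * q + n = s' * q + n') : s = s' ∧ n = n' := by
  have hd : q ∣ (n - n') := ⟨s' - s, by linear_combination h⟩
  have hz : n - n' = 0 := by
    rcases hd with ⟨c, hc⟩
    rcases lt_trichotomy c 0 with hc0 | hc0 | hc0
    · nlinarith
    · rw [hc0] at hc; omega
    · nlinarith
  constructor
  · have : s * q = s' * q := by omega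
    exact mul_right_cancel₀ (by omega) this
  · omega

theorem pv_ord_mem (p : Int) (k : Nat) : ∀ n ∈ pvOrd p k, 0 ≤ n ∧ n < p ^ k := by
  induction k with
  | zero => intro n hn; simp [pvOrd] at hn; simp [hn]
  | succ k ih =>
    intro n hn
    rw [pvOrd] at hn
    obtain ⟨n0, hn0, hn⟩ := List.mem_flatMap.1 hn
    obtain ⟨st, hst, rfl⟩ := List.mem_map.1 hn
    have hs := PySem.List.mem_pyRange_one.1 hst
    have h0 := ih n0 hn0
    have hpk : (0 : Int) < p ^ k := pow_pos (by omega) k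
    constructor
    · have := mul_nonneg hs.1 hpk.le
      omega
    · have h1 : st * p ^ k + n0 < (st + 1) * p ^ k := by nlinarith
      have h2 : (st + 1) * p ^ k ≤ p * p ^ k := by nlinarith
      calc st * p ^ k + n0 < (st + 1) * p ^ k := h1
        _ ≤ p * p ^ k := h2
        _ = p ^ (k + 1) := by ring

theorem pv_ord_nodup (p : Int) (k : Nat) : (pvOrd p k).Nodup := by
  induction k with
  | zero => simp [pvOrd]
  | succ k ih =>
    rw [pvOrd]
    refine List.nodup_flatMap.2 ⟨?_, ?_⟩
    · intro n hn
      refine List.Nodup.map_on ?_ (PySem.List.nodup_pyRange_one 0 p)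
      intro s hs s' hs' he
      have hpk : (0 : Int) < p ^ k :=
        pow_pos (by have := PySem.List.mem_pyRange_one.1 hs; omega) k
      have : s * p ^ k = s' * p ^ k := by omega
      exact mul_right_cancel₀ (by omega) this
    · refine List.Pairwise.imp_of_mem ?_ ih
      intro n n' hn hn' hne x hx hx'
      obtain ⟨s, hs, rfl⟩ := List.mem_map.1 hx
      obtain ⟨s', hs', he⟩ := List.mem_map.1 hx'
      have hb := pv_ord_mem p k n hn
      have hb' := pv_ord_mem p k n' hn'
      have hpk : (0 : Int) < p ^ k :=
        pow_pos (by have := PySem.List.mem_pyRange_one.1 hs; omega) k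
      have := pv_div_unique hpk hb.1 hb.2 hb'.1 hb'.2 he.symm
      exact hne this.2

theorem pv_blocks_fst_mem (p : Int) (K : Nat) :
    ∀ s ∈ (pvBlocks p K).map (·.1), ∃ (j : Nat) (n : Int), j ≤ K ∧ 0 ≤ n ∧ s = mkKey n (j : Int) := by
  induction K with
  | zero =>
    intro s hs
    simp [pvBlocks] at hs
    exact ⟨0, 0, le_rfl, le_rfl, by simp [hs]⟩
  | succ K ih =>
    intro s hs
    rw [pvBlocks] at hs
    rw [List.map_append] at hs
    rcases List.mem_append.1 hs with hs | hs
    · obtain ⟨j, n, hj, hn, he⟩ := ih s hs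
      exact ⟨j, n, by omega, hn, he⟩
    · simp only [pvLevel, List.map_map] at hs
      obtain ⟨n, hn, he⟩ := List.mem_map.1 hs
      exact ⟨K + 1, n, le_rfl, (pv_ord_mem p (K + 1) n hn).1, he.symm⟩

/- ## 4. Loop-shape helpers -/

theorem pv_foldl_append_ite {α β : Type} (P : α → Prop) [DecidablePred P] (f : α → β) :
    ∀ (l : List α) (acc : List β),
      l.foldl (fun acc x => if P x then acc ++ [f x] else acc) acc
        = acc ++ (l.filter (fun x => decide (P x))).map f := by
  intro l
  induction l with
  | nil => intro acc; simp
  | cons x t ih =>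
    intro acc
    by_cases hx : P x
    · simp [List.foldl_cons, hx, ih]
    · simp [List.foldl_cons, hx, ih]

theorem pv_foldl_foldl_flatMap {α β σ : Type} (g : α → List β) (f : σ → β → σ) :
    ∀ (l : List α) (init : σ),
      l.foldl (fun st x => (g x).foldl f st) init = (l.flatMap g).foldl f init := by
  intro l
  induction l with
  | nil => intro init; simp
  | cons x t ih =>
    intro init
    simp [List.foldl_cons, List.foldl_append, ih]

/- ## 5. The two step functions produce the same blocks -/

theorem pv_calc_eq (n k z p : Int) : calculate_value n k z p = pvB_value p n k z := by
  simp [calculate_value, pvB_value, fx, pvGlobalA, pvGlobalB]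

theorem pv_innerDict_eq (p n k : Int) : pvA_innerDict p n k = pvB_innerDict p n k := by
  simp only [pvA_innerDict, pvB_innerDict, pv_calc_eq]

theorem pv_startDict_eq (p : Int) : pvA_startDict p = pvB_startDict p := by
  simp only [pvA_startDict, pvB_startDict, calculate_start_state, fx, pvGlobalA, pvGlobalB,
    add_zero]

theorem pv_not_contains_blocks (p : Int) (K : Nat)
    (d : PySem.Dict String (PySem.Dict String (String × String)))
    (h : d.items = pvBlocks p K) (m : Int) (hm : 0 ≤ m) :
    d.contains (mkKey m ((K : Int) + 1)) = false := by
  rw [PySem.Dict.contains_eq_decide_mem_keys]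
  simp only [PySem.Dict.keys, h, decide_eq_false_iff_not]
  intro hmem
  obtain ⟨j, n, hj, hn, heq⟩ := pv_blocks_fst_mem p K _ hmem
  have := pv_mkKey_inj hm (by omega) hn (by omega) heq
  omega

theorem pv_level_keys_nodup (p : Int) (K : Nat) :
    ((pvOrd p K).map (fun n => mkKey n (K : Int))).Nodup := by
  refine List.Nodup.map_on ?_ (pv_ord_nodup p K)
  intro n hn n' hn' he
  exact (pv_mkKey_inj (pv_ord_mem p K n hn).1 (by omega) (pv_ord_mem p K n' hn').1 (by omega) he).1

theorem pv_filter_blocks_lt (p : Int) (K T : Nat) (h : K < T) :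
    (pvBlocks p K).filter (fun kv => decide (((T : Int) + 1) = parseLevel kv.1 + 1)) = [] := by
  induction K with
  | zero =>
    rw [pvBlocks]
    simp only [List.filter_cons, List.filter_nil]
    rw [pv_parseLevel 0 0 le_rfl le_rfl]
    simp
    omega
  | succ K ih =>
    rw [pvBlocks, List.filter_append, ih (by omega)]
    rw [List.nil_append, List.filter_eq_nil_iff]
    intro kv hkv
    simp only [pvLevel] at hkv
    obtain ⟨n, hn, rfl⟩ := List.mem_map.1 hkv
    rw [pv_parseLevel n _ (pv_ord_mem p (K + 1) n hn).1 (by omega)]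
    simp only [decide_eq_true_eq]
    omega

theorem pv_filter_blocks_self (p : Int) (K : Nat) :
    (((pvBlocks p K).filter (fun kv => decide (((K : Int) + 1) = parseLevel kv.1 + 1))).map (·.1))
      = (pvOrd p K).map (fun n => mkKey n (K : Int)) := by
  cases K with
  | zero =>
    rw [pvBlocks]
    simp only [List.filter_cons, List.filter_nil]
    rw [pv_parseLevel 0 0 le_rfl le_rfl]
    norm_num [pvOrd]
  | succ K =>
    rw [pvBlocks, List.filter_append, pv_filter_blocks_lt p K (K + 1) (by omega), List.nil_append]
    have hall : (pvLevel p (K + 1)).filter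
        (fun kv => decide ((((K : Nat) + 1 : Nat) : Int) + 1 = parseLevel kv.1 + 1))
        = pvLevel p (K + 1) := by
      rw [List.filter_eq_self]
      intro kv hkv
      simp only [pvLevel] at hkv
      obtain ⟨n, hn, rfl⟩ := List.mem_map.1 hkv
      rw [pv_parseLevel n _ (pv_ord_mem p (K + 1) n hn).1 (by omega)]
      simp only [decide_eq_true_eq]
    rw [hall]
    simp [pvLevel, List.map_map]

theorem pv_stepA (p : Int) (K : Nat) (k : Int) (hk : k = (K : Int) + 1)
    (states : PySem.Dict String (PySem.Dict String (String × String)))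
    (h : states.items = pvBlocks p K) :
    (pvA_kStep p states k).items = pvBlocks p (K + 1) := by
  subst hk
  have htn : (((K : Int) + 1) - 1).toNat = K := by omega
  have hcast : ((K + 1 : Nat) : Int) = (K : Int) + 1 := by push_cast; ring
  unfold pvA_kStep
  have hfilter : states.items.foldl (pvA_filterStep ((K : Int) + 1)) []
      = (pvOrd p K).map (fun n => mkKey n (K : Int)) := by
    have hshape : pvA_filterStep ((K : Int) + 1)
        = fun acc (kv : String × PySem.Dict String (String × String)) =>
            if ((K : Int) + 1) = parseLevel kv.1 + 1 then acc ++ [kv.1] else acc := rfl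
    rw [h, hshape, pv_foldl_append_ite
      (fun kv : String × PySem.Dict String (String × String) => ((K : Int) + 1) = parseLevel kv.1 + 1)
      (·.1)]
    rw [List.nil_append]
    exact pv_filter_blocks_self p K
  rw [hfilter]
  rw [List.foldl_map]
  rw [PySem.List.foldl_congr_mem (pvOrd p K) _
    (fun st n => ((PySem.List.pyRange 0 p 1).map (fun s => s * p ^ K + n)).foldl
      (fun st m => st.insert (mkKey m ((K : Int) + 1)) (pvB_innerDict p m ((K : Int) + 1))) st)
    states ?_]
  · rw [pv_foldl_foldl_flatMap]
    have hfr : (pvOrd p K).flatMap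
        (fun n => (PySem.List.pyRange 0 p 1).map (fun s => s * p ^ K + n)) = pvOrd p (K + 1) := rfl
    rw [hfr]
    rw [PySem.Dict.items_foldl_insert_fresh (pvOrd p (K + 1))
      (fun m => mkKey m ((K : Int) + 1)) (fun m => pvB_innerDict p m ((K : Int) + 1)) states
      (fun m hm => pv_not_contains_blocks p K states h m (pv_ord_mem p (K + 1) m hm).1)
      (by rw [show (fun m => mkKey m ((K : Int) + 1)) = (fun m => mkKey m ((K + 1 : Nat) : Int)) by rw [hcast]]
          exact pv_level_keys_nodup p (K + 1))]
    rw [h, pvBlocks]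
    congr 1
  · intro st n hn
    have hnum : parseNum (mkKey n (K : Int)) = n :=
      pv_parseNum n _ (pv_ord_mem p K n hn).1 (by omega)
    show (PySem.List.pyRange 0 p 1).foldl
        (pvA_symStep p ((K : Int) + 1) (parseNum (mkKey n (K : Int)))) st = _
    rw [hnum]
    beta_reduce
    rw [List.foldl_map]
    refine PySem.List.foldl_congr_mem _ _ _ _ ?_
    intro st' s _
    show st'.insert (PySem.Int.toStr (p ^ (((K : Int) + 1) - 1).toNat * s + n) ++ "," ++
        PySem.Int.toStr ((K : Int) + 1))
        (pvA_innerDict p (p ^ (((K : Int) + 1) - 1).toNat * s + n) ((K : Int) + 1)) = _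
    rw [htn, pv_innerDict_eq, pv_mkKey_def, mul_comm (p ^ K) s]

theorem pv_stepB (p : Int) (K : Nat) (k : Int) (hk : k = (K : Int) + 1)
    (acc : PySem.Dict String (PySem.Dict String (String × String)) × List Int)
    (h : acc.1.items = pvBlocks p K) (hf : acc.2 = pvOrd p K) :
    (pvB_kStep p acc k).1.items = pvBlocks p (K + 1)
      ∧ (pvB_kStep p acc k).2 = pvOrd p (K + 1) := by
  obtain ⟨states, front⟩ := acc
  simp only at h hf
  subst hk
  subst hf
  have htn : (((K : Int) + 1) - 1).toNat = K := by omega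
  have hcast : ((K + 1 : Nat) : Int) = (K : Int) + 1 := by push_cast; ring
  unfold pvB_kStep
  simp only [htn]
  have hfr : (pvOrd p K).flatMap
      (fun n => (PySem.List.pyRange 0 p 1).map (fun s => s * p ^ K + n)) = pvOrd p (K + 1) := rfl
  rw [hfr]
  refine ⟨?_, rfl⟩
  simp only [pv_mkKey_def]
  rw [PySem.Dict.items_foldl_insert_fresh (pvOrd p (K + 1))
    (fun n => mkKey n ((K : Int) + 1)) (fun n => pvB_innerDict p n ((K : Int) + 1)) states
    (fun m hm => pv_not_contains_blocks p K states h m (pv_ord_mem p (K + 1) m hm).1)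
    (by rw [show (fun m => mkKey m ((K : Int) + 1)) = (fun m => mkKey m ((K + 1 : Nat) : Int)) by rw [hcast]]
        exact pv_level_keys_nodup p (K + 1))]
  rw [h, pvBlocks]
  congr 1

theorem pv_main (p : Int) :
    create_states_for_linear_function 0 0 p = create_states_for_linear_function_alt 0 0 p := by
  unfold create_states_for_linear_function create_states_for_linear_function_alt
  have hr : PySem.List.pyRange 1 7 1 = [1, 2, 3, 4, 5, 6] := by decide
  simp only [hr, List.foldl_cons, List.foldl_nil]
  have h0A : (PySem.Dict.empty.insert "0,0" (pvA_startDict p)).items = pvBlocks p 0 := by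
    rw [pv_startDict_eq, pv_key00, pvBlocks]
    rfl
  have h0B : (PySem.Dict.empty.insert "0,0" (pvB_startDict p)).items = pvBlocks p 0 := by
    rw [pv_key00, pvBlocks]
    rfl
  have h1 := pv_stepA p 0 1 (by norm_num) _ h0A
  have h2 := pv_stepA p 1 2 (by norm_num) _ h1
  have h3 := pv_stepA p 2 3 (by norm_num) _ h2
  have h4 := pv_stepA p 3 4 (by norm_num) _ h3
  have h5 := pv_stepA p 4 5 (by norm_num) _ h4
  have h6 := pv_stepA p 5 6 (by norm_num) _ h5
  have g1 := pv_stepB p 0 1 (by norm_num) (PySem.Dict.empty.insert "0,0" (pvB_startDict p), [0]) h0B rfl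
  have g2 := pv_stepB p 1 2 (by norm_num) _ g1.1 g1.2
  have g3 := pv_stepB p 2 3 (by norm_num) _ g2.1 g2.2
  have g4 := pv_stepB p 3 4 (by norm_num) _ g3.1 g3.2
  have g5 := pv_stepB p 4 5 (by norm_num) _ g4.1 g4.2
  have g6 := pv_stepB p 5 6 (by norm_num) _ g5.1 g5.2
  rw [h6, g6.1]

theorem pv_ab_irrelevant (a b p : Int) :
    create_states_for_linear_function a b p = create_states_for_linear_function 0 0 p := rfl

theorem pv_ab_irrelevant_alt (a b p : Int) :
    create_states_for_linear_function_alt a b p = create_states_for_linear_function_alt 0 0 p := rfl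

-- ===== VERDICT (by name: the statement is the Claim_ definition above) =====
theorem create_states_for_linear_function_spec : Claim_equal_create_states_for_linear_function := by
  intro a b p _
  unfold Spec_create_states_for_linear_function
  rw [pv_ab_irrelevant a b p, pv_ab_irrelevant_alt a b p]
  exact pv_main p
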